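-- pv_equiv track=rewrite | github.com/hotdonkey/data_science | MIPT/programming_lections/lectures/5.py | get_chapter_words
-- ===== SOURCE A (Python) =====
-- def get_chapter_words(words, target_chapter, chapter_sep):
--     chapter_words = []
--     current_chapter = 0
--     for word in words:
--         if word == chapter_sep:
--             current_chapter += 1
--             continue
--
--         if current_chapter == target_chapter:
--             chapter_words.append(word)
--         elif current_chapter > target_chapter:
--             break
--
--     return chapter_words
-- ===== SOURCE B (Python) =====
-- def get_chapter_words(words, target_chapter, chapter_sep):
--     # one pass: split the word stream into per-chapter segments, then index
--     segments = []
--     current = []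
--     for word in words:
--         if word == chapter_sep:
--             segments.append(current)
--             current = []
--         else:
--             current.append(word)
--     segments.append(current)
--     if 0 <= target_chapter < len(segments):
--         return segments[target_chapter]
--     return []
-- ===== Notes on version B (the rewrite author's own statement) =====
-- stated objective: alternative
-- what changed: B splits the whole word stream into per-chapter segments in one pass and then indexes the segment list, instead of A's counter-driven scan with conditional collection and early break.
import Mathlib
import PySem

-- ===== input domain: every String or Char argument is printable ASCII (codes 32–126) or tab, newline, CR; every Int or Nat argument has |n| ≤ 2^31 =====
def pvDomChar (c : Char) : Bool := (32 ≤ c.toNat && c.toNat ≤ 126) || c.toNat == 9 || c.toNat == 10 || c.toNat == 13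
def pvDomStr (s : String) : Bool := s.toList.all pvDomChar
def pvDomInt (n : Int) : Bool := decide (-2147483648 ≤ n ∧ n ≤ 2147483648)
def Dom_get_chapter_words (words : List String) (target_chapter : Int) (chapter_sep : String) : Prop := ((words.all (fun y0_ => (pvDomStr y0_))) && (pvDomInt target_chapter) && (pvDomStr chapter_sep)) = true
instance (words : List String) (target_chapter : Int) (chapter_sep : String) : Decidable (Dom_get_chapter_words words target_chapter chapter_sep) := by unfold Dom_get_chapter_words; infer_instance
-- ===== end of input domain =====

-- B builds the full per-chapter segment list in one pass and indexes it; A scans with a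
-- chapter counter, collecting only the target chapter and breaking early. Same return value.

-- ===== PORT A =====
-- the for-loop with 'continue'/'break' as structural recursion over words;
-- 'break' returns the words collected so far (here: the empty remainder)
def pvGoA (words : List String) (target_chapter : Int) (chapter_sep : String) (current_chapter : Int) : List String :=
  match words with
  | [] => []
  | w :: ws =>
    if w = chapter_sep then pvGoA ws target_chapter chapter_sep (current_chapter + 1)
    else if current_chapter = target_chapter then w :: pvGoA ws target_chapter chapter_sep current_chapter
    else if current_chapter > target_chapter then []
    else pvGoA ws target_chapter chapter_sep current_chapter

def get_chapter_words (words : List String) (target_chapter : Int) (chapter_sep : String) : List String :=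
  pvGoA words target_chapter chapter_sep 0

-- ===== PORT B =====
-- loop state: (segments, current); each word either closes the current segment or extends it
def pvStepB (chapter_sep : String) (st : List (List String) × List String) (w : String) : List (List String) × List String :=
  if w = chapter_sep then (st.1 ++ [st.2], []) else (st.1, st.2 ++ [w])

def get_chapter_words_alt (words : List String) (target_chapter : Int) (chapter_sep : String) : List String :=
  if 0 ≤ target_chapter then
    (PySem.List.pyGet?
      ((words.foldl (pvStepB chapter_sep) ([], [])).1 ++ [(words.foldl (pvStepB chapter_sep) ([], [])).2])
      target_chapter).getD []
  else []

-- ===== PRECONDITION & SPEC =====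
def Spec_get_chapter_words (words : List String) (target_chapter : Int) (chapter_sep : String) (out : List String) : Prop := out = get_chapter_words_alt words target_chapter chapter_sep
instance (words : List String) (target_chapter : Int) (chapter_sep : String) (out : List String) : Decidable (Spec_get_chapter_words words target_chapter chapter_sep out) := by unfold Spec_get_chapter_words; infer_instance

-- ===== CLAIM (what is proved, stated in full; the proofs are below) =====
def Claim_equal_get_chapter_words : Prop := ∀ (words : List String) (target_chapter : Int) (chapter_sep : String), Dom_get_chapter_words words target_chapter chapter_sep → Spec_get_chapter_words words target_chapter chapter_sep (get_chapter_words words target_chapter chapter_sep)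

-- ===== LEMMAS AND PROOFS =====

-- recursive characterisation of the segment list of a word stream
def pvSegs (words : List String) (chapter_sep : String) : List (List String) :=
  match words with
  | [] => [[]]
  | w :: ws =>
    if w = chapter_sep then [] :: pvSegs ws chapter_sep
    else
      match pvSegs ws chapter_sep with
      | [] => [[w]]
      | s :: rest => (w :: s) :: rest

theorem pvSegs_ne_nil (words : List String) (sep : String) : pvSegs words sep ≠ [] := by
  cases words with
  | nil => simp [pvSegs]
  | cons w ws =>
    simp only [pvSegs]
    split
    · simp
    · cases h : pvSegs ws sep <;> simp

-- the B fold, started from (acc, cur), yields acc ++ (cur prefixed onto pvSegs ws)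
theorem pvFoldB_eq_segs (sep : String) (ws : List String) :
    ∀ (acc : List (List String)) (cur : List String),
      (ws.foldl (pvStepB sep) (acc, cur)).1 ++ [(ws.foldl (pvStepB sep) (acc, cur)).2] =
      acc ++ (match pvSegs ws sep with
              | [] => [cur]
              | s :: rest => (cur ++ s) :: rest) := by
  induction ws with
  | nil => intro acc cur; simp [pvSegs]
  | cons w ws ih =>
    intro acc cur
    by_cases hw : w = sep
    · subst hw
      rw [List.foldl_cons]
      simp only [pvStepB, if_true]
      rw [ih (acc ++ [cur]) []]
      simp only [pvSegs, if_true]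
      cases h : pvSegs ws w with
      | nil => exact absurd h (pvSegs_ne_nil ws w)
      | cons s rest => simp
    · rw [List.foldl_cons]
      simp only [pvStepB, if_neg hw]
      rw [ih acc (cur ++ [w])]
      simp only [pvSegs, if_neg hw]
      cases h : pvSegs ws sep with
      | nil => exact absurd h (pvSegs_ne_nil ws sep)
      | cons s rest => simp

-- A's counter scan computes the (t - c)-th segment (or [] when out of range / c past t)
theorem pvGoA_eq_segs (sep : String) (ws : List String) :
    ∀ (t c : Int),
      pvGoA ws t sep c =
      (if c ≤ t then (pvSegs ws sep).getD (t - c).toNat [] else []) := by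
  induction ws with
  | nil =>
    intro t c
    simp only [pvGoA, pvSegs]
    split
    · cases h : (t - c).toNat <;> simp
    · rfl
  | cons w ws ih =>
    intro t c
    by_cases hw : w = sep
    · simp only [pvGoA, if_pos hw, pvSegs]
      rw [ih t (c + 1)]
      by_cases hct : c ≤ t
      · by_cases hce : c = t
        · subst hce
          simp only [if_pos hct]
          have h1 : ¬ (c + 1 ≤ c) := by omega
          have h2 : (c - c).toNat = 0 := by omega
          simp [h1]
        · have h1 : c + 1 ≤ t := by omega
          have h2 : (t - c).toNat = (t - (c + 1)).toNat + 1 := by omega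
          simp [h1, hct, h2]
      · have h1 : ¬ (c + 1 ≤ t) := by omega
        simp [h1, hct]
    · simp only [pvGoA, if_neg hw, pvSegs]
      by_cases hce : c = t
      · subst hce
        have h0 : (c - c).toNat = 0 := by omega
        rw [ih c c]
        cases h : pvSegs ws sep with
        | nil => exact absurd h (pvSegs_ne_nil ws sep)
        | cons s rest => simp
      · by_cases hgt : c > t
        · have h1 : ¬ (c ≤ t) := by omega
          simp [hce, hgt, h1]
        · have h1 : c ≤ t := by omega
          have h2 : 1 ≤ (t - c).toNat := by omega
          rw [ih t c]
          cases h : pvSegs ws sep with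
          | nil => exact absurd h (pvSegs_ne_nil ws sep)
          | cons s rest =>
            have h3 : (t - c).toNat = ((t - c).toNat - 1) + 1 := by omega
            simp only [if_pos h1]
            rw [h3]
            simp [List.getD, hce, show ¬ t < c from by omega]

-- nonnegative pyGet?-then-default is List.getD
theorem pvPyGetD (l : List (List String)) (t : Int) (ht : 0 ≤ t) :
    (PySem.List.pyGet? l t).getD [] = l.getD t.toNat [] := by
  rw [PySem.List.pyGet?_of_nonneg l ht]
  simp [List.getD]

-- ===== VERDICT (by name: the statement is the Claim_ definition above) =====
theorem get_chapter_words_spec : Claim_equal_get_chapter_words := by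
  intro words t sep _
  unfold Spec_get_chapter_words get_chapter_words get_chapter_words_alt
  rw [pvGoA_eq_segs]
  have hfold := pvFoldB_eq_segs sep words [] []
  simp only [List.nil_append] at hfold
  rw [hfold]
  by_cases ht : 0 ≤ t
  · rw [if_pos ht, if_pos ht, pvPyGetD _ t ht]
    have : t - 0 = t := by omega
    rw [this]
    cases h : pvSegs words sep with
    | nil => exact absurd h (pvSegs_ne_nil words sep)
    | cons s rest => simp
  · rw [if_neg (by omega : ¬ (0:Int) ≤ t), if_neg ht]
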